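-- pv_equiv track=rewrite | github.com/pypi-data/pypi-mirror-403 | packages/ssmd/ssmd-0.7.1.tar.gz/ssmd-0.7.1/ssmd/parser.py | _annotated_attrs_to_tagged
-- ===== SOURCE A (Python) =====
-- def _annotated_attrs_to_tagged(attrs: dict[str, str]) -> dict[str, str]:
--     tag: str | None = None
--     if "ext" in attrs:
--         tag = "extension"
--     elif "src" in attrs:
--         tag = "audio"
--     elif "sub" in attrs:
--         tag = "sub"
--     elif "ph" in attrs or "ipa" in attrs or "sampa" in attrs:
--         tag = "phoneme"
--     elif "as" in attrs:
--         tag = "say-as"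
--     elif "voice" in attrs or "voice-lang" in attrs or "gender" in attrs:
--         tag = "voice"
--     elif "lang" in attrs:
--         tag = "lang"
--     elif any(k in attrs for k in ("volume", "rate", "pitch", "v", "r", "p")):
--         tag = "prosody"
--     elif "emphasis" in attrs:
--         tag = "emphasis"
--
--     if tag:
--         return {**attrs, "tag": tag}
--
--     return attrs
-- ===== SOURCE B (Python) =====
-- # One pass over the dict's keys with a key -> (priority, tag) map, keeping the
-- # best (lowest-priority) hit; no membership tests against attrs at all.
-- _KEY_TAG = {
--     "ext": (0, "extension"),
--     "src": (1, "audio"),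
--     "sub": (2, "sub"),
--     "ph": (3, "phoneme"), "ipa": (3, "phoneme"), "sampa": (3, "phoneme"),
--     "as": (4, "say-as"),
--     "voice": (5, "voice"), "voice-lang": (5, "voice"), "gender": (5, "voice"),
--     "lang": (6, "lang"),
--     "volume": (7, "prosody"), "rate": (7, "prosody"), "pitch": (7, "prosody"),
--     "v": (7, "prosody"), "r": (7, "prosody"), "p": (7, "prosody"),
--     "emphasis": (8, "emphasis"),
-- }
--
--
-- def _annotated_attrs_to_tagged(attrs: dict[str, str]) -> dict[str, str]:
--     best = None
--     for k in attrs: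
--         hit = _KEY_TAG.get(k)
--         if hit is not None and (best is None or hit[0] < best[0]):
--             best = hit
--     if best is None:
--         return attrs
--     return {**attrs, "tag": best[1]}
-- ===== Notes on version B (the rewrite author's own statement) =====
-- stated objective: alternative
-- what changed: Instead of A's nine-branch if/elif chain of membership tests against attrs, B makes a single pass over the dict's own keys, looking each key up in a constant key->(priority,tag) map and keeping the lowest-priority hit; correctness holds because each special key maps to the priority of the branch that would have matched it, so the minimum priority seen equals A's first matching branch.
import Mathlib
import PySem

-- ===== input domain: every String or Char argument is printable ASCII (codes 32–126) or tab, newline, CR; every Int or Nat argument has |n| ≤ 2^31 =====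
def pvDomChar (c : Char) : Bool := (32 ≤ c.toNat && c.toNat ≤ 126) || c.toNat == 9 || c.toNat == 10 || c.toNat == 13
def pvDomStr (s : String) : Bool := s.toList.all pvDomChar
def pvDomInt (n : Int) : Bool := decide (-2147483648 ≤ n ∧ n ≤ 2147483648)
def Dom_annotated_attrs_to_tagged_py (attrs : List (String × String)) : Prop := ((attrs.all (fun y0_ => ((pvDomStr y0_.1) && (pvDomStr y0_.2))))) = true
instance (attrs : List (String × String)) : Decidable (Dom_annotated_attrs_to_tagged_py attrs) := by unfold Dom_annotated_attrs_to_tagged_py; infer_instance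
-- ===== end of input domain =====

-- B replaces A's if/elif membership chain with one pass over the dict's own keys,
-- keeping the lowest-priority hit of a key -> (priority, tag) map (alternative).

-- ===== PORT A =====
def annotated_attrs_to_tagged_py (attrs : List (String × String)) : List (String × String) :=
  let d := PySem.Dict.ofList attrs
  let tag : Option String :=
    if d.contains "ext" then some "extension"
    else if d.contains "src" then some "audio"
    else if d.contains "sub" then some "sub"
    else if d.contains "ph" || d.contains "ipa" || d.contains "sampa" then some "phoneme"
    else if d.contains "as" then some "say-as"
    else if d.contains "voice" || d.contains "voice-lang" || d.contains "gender" then some "voice"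
    else if d.contains "lang" then some "lang"
    else if (["volume", "rate", "pitch", "v", "r", "p"] : List String).any d.contains then some "prosody"
    else if d.contains "emphasis" then some "emphasis"
    else none
  match tag with
  | some t => (d.insert "tag" t).items
  | none => d.items

-- ===== PORT B =====
-- the constant _KEY_TAG dict of Source B
def pvKeyTag : PySem.Dict String (Int × String) :=
  PySem.Dict.ofList
    [("ext", (0, "extension")),
     ("src", (1, "audio")),
     ("sub", (2, "sub")),
     ("ph", (3, "phoneme")), ("ipa", (3, "phoneme")), ("sampa", (3, "phoneme")),
     ("as", (4, "say-as")),
     ("voice", (5, "voice")), ("voice-lang", (5, "voice")), ("gender", (5, "voice")),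
     ("lang", (6, "lang")),
     ("volume", (7, "prosody")), ("rate", (7, "prosody")), ("pitch", (7, "prosody")),
     ("v", (7, "prosody")), ("r", (7, "prosody")), ("p", (7, "prosody")),
     ("emphasis", (8, "emphasis"))]

-- one iteration of Source B's loop body: hit = _KEY_TAG.get(k); keep the smaller priority
def pvStep (best : Option (Int × String)) (k : String) : Option (Int × String) :=
  match pvKeyTag.get? k with
  | none => best
  | some hit =>
    match best with
    | none => some hit
    | some b => if hit.1 < b.1 then some hit else best

def annotated_attrs_to_tagged_py_alt (attrs : List (String × String)) : List (String × String) :=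
  let d := PySem.Dict.ofList attrs
  match d.keys.foldl pvStep none with
  | none => d.items
  | some best => (d.insert "tag" best.2).items

-- ===== PRECONDITION & SPEC =====
def Spec_annotated_attrs_to_tagged_py (attrs : List (String × String)) (out : List (String × String)) : Prop := out = annotated_attrs_to_tagged_py_alt attrs
instance (attrs : List (String × String)) (out : List (String × String)) : Decidable (Spec_annotated_attrs_to_tagged_py attrs out) := by unfold Spec_annotated_attrs_to_tagged_py; infer_instance

-- ===== CLAIM (what is proved, stated in full; the proofs are below) =====
def Claim_equal_annotated_attrs_to_tagged_py : Prop := ∀ (attrs : List (String × String)), Dom_annotated_attrs_to_tagged_py attrs → Spec_annotated_attrs_to_tagged_py attrs (annotated_attrs_to_tagged_py attrs)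

-- ===== LEMMAS AND PROOFS =====
-- A's priority chain over nine condition booleans, and over a plain key list
def pvChainB (c1 c2 c3 c4 c5 c6 c7 c8 c9 : Bool) : Option (Int × String) :=
  if c1 then some (0, "extension")
  else if c2 then some (1, "audio")
  else if c3 then some (2, "sub")
  else if c4 then some (3, "phoneme")
  else if c5 then some (4, "say-as")
  else if c6 then some (5, "voice")
  else if c7 then some (6, "lang")
  else if c8 then some (7, "prosody")
  else if c9 then some (8, "emphasis")
  else none

def pvChainP (ks : List String) : Option (Int × String) :=
  pvChainB (ks.contains "ext") (ks.contains "src") (ks.contains "sub")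
    (ks.contains "ph" || ks.contains "ipa" || ks.contains "sampa")
    (ks.contains "as")
    (ks.contains "voice" || ks.contains "voice-lang" || ks.contains "gender")
    (ks.contains "lang")
    (ks.contains "volume" || (ks.contains "rate" || (ks.contains "pitch" ||
      (ks.contains "v" || (ks.contains "r" || ks.contains "p")))))
    (ks.contains "emphasis")

-- closed form of pvKeyTag.get?
def pvKeyFun (k : String) : Option (Int × String) :=
  if "ext" = k then some (0, "extension")
  else if "src" = k then some (1, "audio")
  else if "sub" = k then some (2, "sub")
  else if "ph" = k then some (3, "phoneme")
  else if "ipa" = k then some (3, "phoneme")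
  else if "sampa" = k then some (3, "phoneme")
  else if "as" = k then some (4, "say-as")
  else if "voice" = k then some (5, "voice")
  else if "voice-lang" = k then some (5, "voice")
  else if "gender" = k then some (5, "voice")
  else if "lang" = k then some (6, "lang")
  else if "volume" = k then some (7, "prosody")
  else if "rate" = k then some (7, "prosody")
  else if "pitch" = k then some (7, "prosody")
  else if "v" = k then some (7, "prosody")
  else if "r" = k then some (7, "prosody")
  else if "p" = k then some (7, "prosody")
  else if "emphasis" = k then some (8, "emphasis")
  else none

theorem pvKeyTag_eq_mk : pvKeyTag = PySem.Dict.mk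
    [("ext", (0, "extension")),
     ("src", (1, "audio")),
     ("sub", (2, "sub")),
     ("ph", (3, "phoneme")), ("ipa", (3, "phoneme")), ("sampa", (3, "phoneme")),
     ("as", (4, "say-as")),
     ("voice", (5, "voice")), ("voice-lang", (5, "voice")), ("gender", (5, "voice")),
     ("lang", (6, "lang")),
     ("volume", (7, "prosody")), ("rate", (7, "prosody")), ("pitch", (7, "prosody")),
     ("v", (7, "prosody")), ("r", (7, "prosody")), ("p", (7, "prosody")),
     ("emphasis", (8, "emphasis"))] := by decide

theorem pvKeyTag_get? (k : String) : pvKeyTag.get? k = pvKeyFun k := by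
  rw [pvKeyTag_eq_mk]
  simp only [PySem.Dict.get?_mk_cons, beq_iff_eq, pvKeyFun]
  norm_num [PySem.Dict.get?]

def pvMerge : Option (Int × String) → Option (Int × String) → Option (Int × String)
  | none, b => b
  | some a, none => some a
  | some a, some b => if b.1 < a.1 then some b else some a

theorem pvStep_eq_merge (acc : Option (Int × String)) (k : String) :
    pvStep acc k = pvMerge acc (pvKeyTag.get? k) := by
  cases h : pvKeyTag.get? k <;> cases acc <;> simp [pvStep, pvMerge, h]

theorem pvMerge_assoc (a b c : Option (Int × String)) :
    pvMerge (pvMerge a b) c = pvMerge a (pvMerge b c) := by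
  rcases a with _ | ⟨pa, ta⟩
  · rfl
  rcases b with _ | ⟨pb, tb⟩
  · rfl
  rcases c with _ | ⟨pc, tc⟩
  · by_cases h : pb < pa <;> simp [pvMerge, h]
  · by_cases h1 : pb < pa <;> by_cases h2 : pc < pb <;> by_cases h3 : pc < pa <;>
      simp [pvMerge, h1, h2, h3] <;> omega
theorem pvG1 : ∀ (c1 c2 c3 c4 c5 c6 c7 c8 c9 : Bool),
    pvChainB true c2 c3 c4 c5 c6 c7 c8 c9 = pvMerge (some (0, "extension")) (pvChainB c1 c2 c3 c4 c5 c6 c7 c8 c9) := by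
  decide
theorem pvG2 : ∀ (c1 c2 c3 c4 c5 c6 c7 c8 c9 : Bool),
    pvChainB c1 true c3 c4 c5 c6 c7 c8 c9 = pvMerge (some (1, "audio")) (pvChainB c1 c2 c3 c4 c5 c6 c7 c8 c9) := by
  decide
theorem pvG3 : ∀ (c1 c2 c3 c4 c5 c6 c7 c8 c9 : Bool),
    pvChainB c1 c2 true c4 c5 c6 c7 c8 c9 = pvMerge (some (2, "sub")) (pvChainB c1 c2 c3 c4 c5 c6 c7 c8 c9) := by
  decide
theorem pvG4 : ∀ (c1 c2 c3 c4 c5 c6 c7 c8 c9 : Bool),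
    pvChainB c1 c2 c3 true c5 c6 c7 c8 c9 = pvMerge (some (3, "phoneme")) (pvChainB c1 c2 c3 c4 c5 c6 c7 c8 c9) := by
  decide
theorem pvG5 : ∀ (c1 c2 c3 c4 c5 c6 c7 c8 c9 : Bool),
    pvChainB c1 c2 c3 c4 true c6 c7 c8 c9 = pvMerge (some (4, "say-as")) (pvChainB c1 c2 c3 c4 c5 c6 c7 c8 c9) := by
  decide
theorem pvG6 : ∀ (c1 c2 c3 c4 c5 c6 c7 c8 c9 : Bool),
    pvChainB c1 c2 c3 c4 c5 true c7 c8 c9 = pvMerge (some (5, "voice")) (pvChainB c1 c2 c3 c4 c5 c6 c7 c8 c9) := by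
  decide
theorem pvG7 : ∀ (c1 c2 c3 c4 c5 c6 c7 c8 c9 : Bool),
    pvChainB c1 c2 c3 c4 c5 c6 true c8 c9 = pvMerge (some (6, "lang")) (pvChainB c1 c2 c3 c4 c5 c6 c7 c8 c9) := by
  decide
theorem pvG8 : ∀ (c1 c2 c3 c4 c5 c6 c7 c8 c9 : Bool),
    pvChainB c1 c2 c3 c4 c5 c6 c7 true c9 = pvMerge (some (7, "prosody")) (pvChainB c1 c2 c3 c4 c5 c6 c7 c8 c9) := by
  decide
theorem pvG9 : ∀ (c1 c2 c3 c4 c5 c6 c7 c8 c9 : Bool),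
    pvChainB c1 c2 c3 c4 c5 c6 c7 c8 true = pvMerge (some (8, "emphasis")) (pvChainB c1 c2 c3 c4 c5 c6 c7 c8 c9) := by
  decide
theorem pvChain_cons (k : String) (ks : List String) :
    pvChainP (k :: ks) = pvMerge (pvKeyTag.get? k) (pvChainP ks) := by
  rw [pvKeyTag_get?]
  by_cases h1 : "ext" = k
  · subst h1
    show pvChainP ("ext" :: ks) = pvMerge (some (0, "extension")) (pvChainP ks)
    unfold pvChainP
    simp only [List.contains_cons, String.reduceBEq, beq_self_eq_true,
      Bool.true_or, Bool.or_true, Bool.false_or]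
    apply pvG1
  by_cases h2 : "src" = k
  · subst h2
    show pvChainP ("src" :: ks) = pvMerge (some (1, "audio")) (pvChainP ks)
    unfold pvChainP
    simp only [List.contains_cons, String.reduceBEq, beq_self_eq_true,
      Bool.true_or, Bool.or_true, Bool.false_or]
    apply pvG2
  by_cases h3 : "sub" = k
  · subst h3
    show pvChainP ("sub" :: ks) = pvMerge (some (2, "sub")) (pvChainP ks)
    unfold pvChainP
    simp only [List.contains_cons, String.reduceBEq, beq_self_eq_true,
      Bool.true_or, Bool.or_true, Bool.false_or]
    apply pvG3
  by_cases h4 : "ph" = k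
  · subst h4
    show pvChainP ("ph" :: ks) = pvMerge (some (3, "phoneme")) (pvChainP ks)
    unfold pvChainP
    simp only [List.contains_cons, String.reduceBEq, beq_self_eq_true,
      Bool.true_or, Bool.or_true, Bool.false_or]
    apply pvG4
  by_cases h5 : "ipa" = k
  · subst h5
    show pvChainP ("ipa" :: ks) = pvMerge (some (3, "phoneme")) (pvChainP ks)
    unfold pvChainP
    simp only [List.contains_cons, String.reduceBEq, beq_self_eq_true,
      Bool.true_or, Bool.or_true, Bool.false_or]
    apply pvG4
  by_cases h6 : "sampa" = k
  · subst h6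
    show pvChainP ("sampa" :: ks) = pvMerge (some (3, "phoneme")) (pvChainP ks)
    unfold pvChainP
    simp only [List.contains_cons, String.reduceBEq, beq_self_eq_true,
      Bool.true_or, Bool.or_true, Bool.false_or]
    apply pvG4
  by_cases h7 : "as" = k
  · subst h7
    show pvChainP ("as" :: ks) = pvMerge (some (4, "say-as")) (pvChainP ks)
    unfold pvChainP
    simp only [List.contains_cons, String.reduceBEq, beq_self_eq_true,
      Bool.true_or, Bool.or_true, Bool.false_or]
    apply pvG5
  by_cases h8 : "voice" = k
  · subst h8
    show pvChainP ("voice" :: ks) = pvMerge (some (5, "voice")) (pvChainP ks)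
    unfold pvChainP
    simp only [List.contains_cons, String.reduceBEq, beq_self_eq_true,
      Bool.true_or, Bool.or_true, Bool.false_or]
    apply pvG6
  by_cases h9 : "voice-lang" = k
  · subst h9
    show pvChainP ("voice-lang" :: ks) = pvMerge (some (5, "voice")) (pvChainP ks)
    unfold pvChainP
    simp only [List.contains_cons, String.reduceBEq, beq_self_eq_true,
      Bool.true_or, Bool.or_true, Bool.false_or]
    apply pvG6
  by_cases h10 : "gender" = k
  · subst h10
    show pvChainP ("gender" :: ks) = pvMerge (some (5, "voice")) (pvChainP ks)
    unfold pvChainP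
    simp only [List.contains_cons, String.reduceBEq, beq_self_eq_true,
      Bool.true_or, Bool.or_true, Bool.false_or]
    apply pvG6
  by_cases h11 : "lang" = k
  · subst h11
    show pvChainP ("lang" :: ks) = pvMerge (some (6, "lang")) (pvChainP ks)
    unfold pvChainP
    simp only [List.contains_cons, String.reduceBEq, beq_self_eq_true,
      Bool.true_or, Bool.or_true, Bool.false_or]
    apply pvG7
  by_cases h12 : "volume" = k
  · subst h12
    show pvChainP ("volume" :: ks) = pvMerge (some (7, "prosody")) (pvChainP ks)
    unfold pvChainP
    simp only [List.contains_cons, String.reduceBEq, beq_self_eq_true,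
      Bool.true_or, Bool.or_true, Bool.false_or]
    apply pvG8
  by_cases h13 : "rate" = k
  · subst h13
    show pvChainP ("rate" :: ks) = pvMerge (some (7, "prosody")) (pvChainP ks)
    unfold pvChainP
    simp only [List.contains_cons, String.reduceBEq, beq_self_eq_true,
      Bool.true_or, Bool.or_true, Bool.false_or]
    apply pvG8
  by_cases h14 : "pitch" = k
  · subst h14
    show pvChainP ("pitch" :: ks) = pvMerge (some (7, "prosody")) (pvChainP ks)
    unfold pvChainP
    simp only [List.contains_cons, String.reduceBEq, beq_self_eq_true,
      Bool.true_or, Bool.or_true, Bool.false_or]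
    apply pvG8
  by_cases h15 : "v" = k
  · subst h15
    show pvChainP ("v" :: ks) = pvMerge (some (7, "prosody")) (pvChainP ks)
    unfold pvChainP
    simp only [List.contains_cons, String.reduceBEq, beq_self_eq_true,
      Bool.true_or, Bool.or_true, Bool.false_or]
    apply pvG8
  by_cases h16 : "r" = k
  · subst h16
    show pvChainP ("r" :: ks) = pvMerge (some (7, "prosody")) (pvChainP ks)
    unfold pvChainP
    simp only [List.contains_cons, String.reduceBEq, beq_self_eq_true,
      Bool.true_or, Bool.or_true, Bool.false_or]
    apply pvG8
  by_cases h17 : "p" = k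
  · subst h17
    show pvChainP ("p" :: ks) = pvMerge (some (7, "prosody")) (pvChainP ks)
    unfold pvChainP
    simp only [List.contains_cons, String.reduceBEq, beq_self_eq_true,
      Bool.true_or, Bool.or_true, Bool.false_or]
    apply pvG8
  by_cases h18 : "emphasis" = k
  · subst h18
    show pvChainP ("emphasis" :: ks) = pvMerge (some (8, "emphasis")) (pvChainP ks)
    unfold pvChainP
    simp only [List.contains_cons, String.reduceBEq, beq_self_eq_true,
      Bool.true_or, Bool.or_true, Bool.false_or]
    apply pvG9
  · -- k matches no rule: the lookup is none and every membership test is unchanged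
    have e1 : ("ext" == k) = false := beq_eq_false_iff_ne.mpr h1
    have e2 : ("src" == k) = false := beq_eq_false_iff_ne.mpr h2
    have e3 : ("sub" == k) = false := beq_eq_false_iff_ne.mpr h3
    have e4 : ("ph" == k) = false := beq_eq_false_iff_ne.mpr h4
    have e5 : ("ipa" == k) = false := beq_eq_false_iff_ne.mpr h5
    have e6 : ("sampa" == k) = false := beq_eq_false_iff_ne.mpr h6
    have e7 : ("as" == k) = false := beq_eq_false_iff_ne.mpr h7
    have e8 : ("voice" == k) = false := beq_eq_false_iff_ne.mpr h8
    have e9 : ("voice-lang" == k) = false := beq_eq_false_iff_ne.mpr h9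
    have e10 : ("gender" == k) = false := beq_eq_false_iff_ne.mpr h10
    have e11 : ("lang" == k) = false := beq_eq_false_iff_ne.mpr h11
    have e12 : ("volume" == k) = false := beq_eq_false_iff_ne.mpr h12
    have e13 : ("rate" == k) = false := beq_eq_false_iff_ne.mpr h13
    have e14 : ("pitch" == k) = false := beq_eq_false_iff_ne.mpr h14
    have e15 : ("v" == k) = false := beq_eq_false_iff_ne.mpr h15
    have e16 : ("r" == k) = false := beq_eq_false_iff_ne.mpr h16
    have e17 : ("p" == k) = false := beq_eq_false_iff_ne.mpr h17
    have e18 : ("emphasis" == k) = false := beq_eq_false_iff_ne.mpr h18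
    unfold pvKeyFun pvChainP
    rw [if_neg h1, if_neg h2, if_neg h3, if_neg h4, if_neg h5, if_neg h6, if_neg h7, if_neg h8, if_neg h9, if_neg h10, if_neg h11, if_neg h12, if_neg h13, if_neg h14, if_neg h15, if_neg h16, if_neg h17, if_neg h18]
    simp only [List.contains_cons, e1, e2, e3, e4, e5, e6, e7, e8, e9, e10, e11, e12, e13, e14, e15, e16, e17, e18, Bool.false_or, pvMerge]

theorem pvFold_eq_chain (ks : List String) (acc : Option (Int × String)) :
    ks.foldl pvStep acc = pvMerge acc (pvChainP ks) := by
  induction ks generalizing acc with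
  | nil => cases acc <;> rfl
  | cons k ks ih =>
    rw [List.foldl_cons, ih, pvStep_eq_merge, pvMerge_assoc, ← pvChain_cons]

theorem pv_contains_keys (d : PySem.Dict String String) (k : String) :
    d.contains k = d.keys.contains k := by
  rw [PySem.Dict.contains_eq_decide_mem_keys]
  simp

-- ===== VERDICT (by name: the statement is the Claim_ definition above) =====
theorem annotated_attrs_to_tagged_py_spec : Claim_equal_annotated_attrs_to_tagged_py := by
  intro attrs _
  show annotated_attrs_to_tagged_py attrs = annotated_attrs_to_tagged_py_alt attrs
  unfold annotated_attrs_to_tagged_py annotated_attrs_to_tagged_py_alt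
  simp only [pvFold_eq_chain, pvMerge]
  simp only [List.any_cons, List.any_nil, Bool.or_false, pv_contains_keys, pvChainP, pvChainB]
  split_ifs <;> rfl
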